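-- pv_equiv track=rewrite | github.com/cliffxuan/nvim-config | lua/vibe-coding/python_impl/fix_diff.py | _diff_touches_last_line
-- ===== SOURCE A (Python) =====
-- def _diff_touches_last_line(
--     diff_lines: list[str], original_content: str
-- ) -> bool:
--     """Check if the diff touches the last line or if the last line appears in diff context."""
--     if not original_content or not diff_lines:
--         return False
--
--     # Get the actual last line of the original file
--     original_lines = original_content.split("\n")
--     last_original_line = original_lines[-1] if original_lines else ""
--
--     # Check if any deletion matches the last line of the original file
--     for line in diff_lines:
--         if line.startswith("-") and not line.startswith("---"):
--             deletion_content = line[1:]  # Remove - prefix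
--             if deletion_content == last_original_line:
--                 return True
--
--     # Check if the last line appears as context in the diff (starts with space)
--     for line in diff_lines:
--         if line.startswith(" "):
--             context_content = line[1:]  # Remove space prefix
--             if context_content == last_original_line:
--                 return True
--
--     # Check if there's a pattern where the last line is deleted and something else is added
--     has_last_line_deletion = any(
--         line.startswith("-") and line[1:] == last_original_line
--         for line in diff_lines
--     )
--
--     if has_last_line_deletion:
--         # If the last line was deleted, any addition could be modifying the last line
--         return any(
--             line.startswith("+") and not line.startswith("+++")
--             for line in diff_lines
--         )
--
--     return False
-- ===== SOURCE B (Python) =====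
-- def _diff_touches_last_line(
--     diff_lines: list[str], original_content: str
-- ) -> bool:
--     """Single-pass version: accumulate four flags over one traversal, combine at the end."""
--     if not original_content or not diff_lines:
--         return False
--     last = original_content.split("\n")[-1]
--     del_match = context_match = del_match_any = has_addition = False
--     for line in diff_lines:
--         is_del = line.startswith("-")
--         rest_matches = line[1:] == last
--         del_match = del_match or (is_del and not line.startswith("---") and rest_matches)
--         context_match = context_match or (line.startswith(" ") and rest_matches)
--         del_match_any = del_match_any or (is_del and rest_matches)
--         has_addition = has_addition or (
--             line.startswith("+") and not line.startswith("+++")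
--         )
--     return del_match or context_match or (del_match_any and has_addition)
-- ===== Notes on version B (the rewrite author's own statement) =====
-- stated objective: simpler
-- what changed: Replaced A's three sequential scans of diff_lines (two early-return loops plus an any/any pair) with one single pass accumulating four boolean flags, combined at the end as del_match or context_match or (del_match_any and has_addition).
import Mathlib
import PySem

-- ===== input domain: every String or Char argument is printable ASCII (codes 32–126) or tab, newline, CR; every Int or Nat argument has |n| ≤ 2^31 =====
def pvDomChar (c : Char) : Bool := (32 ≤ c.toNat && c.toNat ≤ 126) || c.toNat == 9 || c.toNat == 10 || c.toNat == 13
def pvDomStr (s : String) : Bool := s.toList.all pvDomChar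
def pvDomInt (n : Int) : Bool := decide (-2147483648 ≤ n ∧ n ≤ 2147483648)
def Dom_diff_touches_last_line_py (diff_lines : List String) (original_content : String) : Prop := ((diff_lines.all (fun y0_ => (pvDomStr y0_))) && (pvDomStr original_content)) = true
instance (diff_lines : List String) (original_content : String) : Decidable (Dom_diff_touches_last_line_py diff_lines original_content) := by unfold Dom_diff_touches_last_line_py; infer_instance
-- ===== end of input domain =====

-- B replaces A's three sequential scans and early returns with one single pass accumulating
-- four flags and a final combining expression (objective: simpler).

-- ===== PORT A =====
-- A's three for-loops with early 'return True' are ported as List.any in sequence;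
-- original_lines[-1] is total here (guarded by the conditional), ported with pyGetD.
def diff_touches_last_line_py (diff_lines : List String) (original_content : String) : Bool :=
  if original_content = "" || diff_lines.isEmpty then false
  else
    let original_lines := ((PySem.Str.split? original_content "\n").getD [])
    let last_original_line := if original_lines.isEmpty then "" else PySem.List.pyGetD original_lines (-1) ""
    if diff_lines.any (fun line =>
        PySem.Str.startswith line "-" && !PySem.Str.startswith line "---" &&
        (PySem.Str.slice line (some 1) none == last_original_line)) then true
    else if diff_lines.any (fun line =>
        PySem.Str.startswith line " " &&
        (PySem.Str.slice line (some 1) none == last_original_line)) then true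
    else if diff_lines.any (fun line =>
        PySem.Str.startswith line "-" &&
        (PySem.Str.slice line (some 1) none == last_original_line)) then
      diff_lines.any (fun line =>
        PySem.Str.startswith line "+" && !PySem.Str.startswith line "+++")
    else false

-- ===== PORT B =====
-- single fold over diff_lines carrying (del_match, context_match, del_match_any, has_addition)
def diff_touches_last_line_py_alt (diff_lines : List String) (original_content : String) : Bool :=
  if original_content = "" || diff_lines.isEmpty then false
  else
    let last := PySem.List.pyGetD (((PySem.Str.split? original_content "\n").getD [])) (-1) ""
    let st := diff_lines.foldl (fun (st : Bool × Bool × Bool × Bool) line =>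
        let isDel := PySem.Str.startswith line "-"
        let rm := PySem.Str.slice line (some 1) none == last
        (st.1 || (isDel && !PySem.Str.startswith line "---" && rm),
         st.2.1 || (PySem.Str.startswith line " " && rm),
         st.2.2.1 || (isDel && rm),
         st.2.2.2 || (PySem.Str.startswith line "+" && !PySem.Str.startswith line "+++")))
      (false, false, false, false)
    st.1 || st.2.1 || (st.2.2.1 && st.2.2.2)

-- ===== PRECONDITION & SPEC =====
def Spec_diff_touches_last_line_py (diff_lines : List String) (original_content : String) (out : Bool) : Prop := out = diff_touches_last_line_py_alt diff_lines original_content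
instance (diff_lines : List String) (original_content : String) (out : Bool) : Decidable (Spec_diff_touches_last_line_py diff_lines original_content out) := by unfold Spec_diff_touches_last_line_py; infer_instance

-- ===== CLAIM (what is proved, stated in full; the proofs are below) =====
def Claim_equal_diff_touches_last_line_py : Prop := ∀ (diff_lines : List String) (original_content : String), Dom_diff_touches_last_line_py diff_lines original_content → Spec_diff_touches_last_line_py diff_lines original_content (diff_touches_last_line_py diff_lines original_content)

-- ===== LEMMAS AND PROOFS =====

-- the four-flag fold of port B computes the four 'any's at once
theorem pv_foldl_flags (L : String) (dl : List String) (a b c d : Bool) :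
    dl.foldl (fun (st : Bool × Bool × Bool × Bool) line =>
        let isDel := PySem.Str.startswith line "-"
        let rm := PySem.Str.slice line (some 1) none == L
        (st.1 || (isDel && !PySem.Str.startswith line "---" && rm),
         st.2.1 || (PySem.Str.startswith line " " && rm),
         st.2.2.1 || (isDel && rm),
         st.2.2.2 || (PySem.Str.startswith line "+" && !PySem.Str.startswith line "+++")))
      (a, b, c, d)
    = (a || dl.any (fun line =>
          PySem.Str.startswith line "-" && !PySem.Str.startswith line "---" &&
          (PySem.Str.slice line (some 1) none == L)),
       b || dl.any (fun line =>
          PySem.Str.startswith line " " && (PySem.Str.slice line (some 1) none == L)),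
       c || dl.any (fun line =>
          PySem.Str.startswith line "-" && (PySem.Str.slice line (some 1) none == L)),
       d || dl.any (fun line =>
          PySem.Str.startswith line "+" && !PySem.Str.startswith line "+++")) := by
  induction dl generalizing a b c d with
  | nil => simp
  | cons x xs ih =>
      simp only [List.foldl_cons]
      rw [ih]
      simp [Bool.or_assoc]

theorem diff_touches_last_line_py_eq_alt (diff_lines : List String) (original_content : String) :
    diff_touches_last_line_py diff_lines original_content
      = diff_touches_last_line_py_alt diff_lines original_content := by
  unfold diff_touches_last_line_py diff_touches_last_line_py_alt
  by_cases hg : original_content = "" || diff_lines.isEmpty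
  · simp [hg]
  · simp only [hg, if_false, Bool.false_eq_true]
    have hlast : (if (((PySem.Str.split? original_content "\n").getD [])).isEmpty then ""
        else PySem.List.pyGetD (((PySem.Str.split? original_content "\n").getD [])) (-1) "")
        = PySem.List.pyGetD (((PySem.Str.split? original_content "\n").getD [])) (-1) "" := by
      cases h : ((PySem.Str.split? original_content "\n").getD []) with
      | nil => simp [PySem.List.pyGetD, PySem.List.pyGet?]
      | cons y ys => simp
    rw [hlast]
    set L := PySem.List.pyGetD (((PySem.Str.split? original_content "\n").getD [])) (-1) "" with hL
    rw [pv_foldl_flags L diff_lines]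
    simp only [Bool.false_or]
    cases h1 : diff_lines.any (fun line =>
        PySem.Str.startswith line "-" && !PySem.Str.startswith line "---" &&
        (PySem.Str.slice line (some 1) none == L)) <;>
    cases h2 : diff_lines.any (fun line =>
        PySem.Str.startswith line " " &&
        (PySem.Str.slice line (some 1) none == L)) <;>
    cases h3 : diff_lines.any (fun line =>
        PySem.Str.startswith line "-" &&
        (PySem.Str.slice line (some 1) none == L)) <;>
    simp

-- ===== VERDICT (by name: the statement is the Claim_ definition above) =====
theorem diff_touches_last_line_py_spec : Claim_equal_diff_touches_last_line_py := by
  intro diff_lines original_content _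
  unfold Spec_diff_touches_last_line_py
  exact diff_touches_last_line_py_eq_alt diff_lines original_content
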